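-- pv_equiv track=rewrite | github.com/newkimjiwon/CodingTest | BAEKJOON/P5/3015번_오아시스 재결합.py | solution
-- ===== SOURCE A (Python) =====
-- def solution(N, people):
--     answer = 0  # Result
--
--     stack = []  # Stack
--
--     for n in people:
--         count = 1  # 같은 키 사람 수 (초기 1명)
--
--         # 스택의 top이 현재 사람보다 작으면 pop하면서 볼 수 있는 쌍 누적
--         while stack and stack[-1][0] < n:
--             height, c = stack.pop()
--             answer += c  # 작은 키 그룹은 모두 볼 수 있음
--
--         # 같은 키가 있을 경우
--         if stack and stack[-1][0] == n:
--             height, c = stack.pop()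
--             answer += c  # 같은 키 그룹끼리는 모두 볼 수 있음
--             count += c   # 같은 키 사람 수 누적
--             if stack:
--                 answer += 1  # 자기보다 큰 사람이 뒤에 남아 있으면 그 사람도 볼 수 있음
--         else:
--             if stack:
--                 answer += 1  # 자기보다 큰 사람 1명은 항상 볼 수 있음
--
--         stack.append((n, count))  # 현재 사람을 스택에 추가
--
--     return answer
-- ===== SOURCE B (Python) =====
-- def solution(N, people):
--     # Direct O(n^2) pairwise count: pair (i, j) is visible iff the maximum
--     # height strictly between them is <= min(people[i], people[j]).
--     answer = 0
--     n = len(people)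
--     for i in range(n):
--         cur_max = None
--         for j in range(i + 1, n):
--             if cur_max is None or cur_max <= min(people[i], people[j]):
--                 answer += 1
--             if cur_max is None or people[j] > cur_max:
--                 cur_max = people[j]
--     return answer
-- ===== Notes on version B (the rewrite author's own statement) =====
-- stated objective: alternative
-- what changed: Replaces the monotonic stack with counts by a direct definitional pairwise count: for each i, scan rightward maintaining the running maximum strictly between i and j, incrementing whenever that maximum is <= min(people[i], people[j]).
import Mathlib
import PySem

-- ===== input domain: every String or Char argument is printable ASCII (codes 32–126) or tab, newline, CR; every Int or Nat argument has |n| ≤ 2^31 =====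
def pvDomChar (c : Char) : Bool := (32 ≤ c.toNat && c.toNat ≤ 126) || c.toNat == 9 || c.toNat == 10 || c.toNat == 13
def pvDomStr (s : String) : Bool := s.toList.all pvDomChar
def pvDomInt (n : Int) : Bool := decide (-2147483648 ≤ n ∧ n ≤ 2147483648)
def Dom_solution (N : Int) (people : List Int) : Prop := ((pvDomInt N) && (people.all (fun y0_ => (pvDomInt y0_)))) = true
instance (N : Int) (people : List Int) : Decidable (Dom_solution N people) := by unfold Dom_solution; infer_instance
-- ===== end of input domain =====

-- B replaces A's monotonic stack with a direct O(n^2) pairwise visibility count (objective: alternative, not faster).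

-- ===== PORT A =====
-- A's stack is a Python list with the top at the END; we hold it top-FIRST so that
-- the while-pop loop is structural recursion on the list (same entries, same order of pops).
def popWhile (n : Int) : Int → List (Int × Int) → Int × List (Int × Int)
  | ans, [] => (ans, [])
  | ans, (h, c) :: rest =>
      if h < n then popWhile n (ans + c) rest else (ans, (h, c) :: rest)

def stepA (st : Int × List (Int × Int)) (n : Int) : Int × List (Int × Int) :=
  match popWhile n st.1 st.2 with
  | (ans1, (h, c) :: rest) =>
      if h == n then
        -- equal-height group: pop it, answer += c, count += c, +1 if the stack is still nonempty
        (ans1 + c + (if rest.isEmpty then 0 else 1), (n, 1 + c) :: rest)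
      else
        -- taller person remains on the stack
        (ans1 + 1, (n, 1) :: (h, c) :: rest)
  | (ans1, []) => (ans1, [(n, 1)])

def solution (N : Int) (people : List Int) : Int :=
  (people.foldl stepA (0, [])).1

-- ===== PORT B =====
-- cur_max is None / cur_max <= m  (Python: "cur_max is None or cur_max <= m")
def cmLe : Option Int → Int → Bool
  | none, _ => true
  | some c, m => decide (c ≤ m)

-- Python: "if cur_max is None or people[j] > cur_max: cur_max = people[j]"
def upd (cm : Option Int) (y : Int) : Option Int :=
  some (match cm with | none => y | some c => if c < y then y else c)

-- inner loop: j runs over the elements after i, maintaining cur_max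
def altInner (x : Int) : Int → Option Int → List Int → Int
  | acc, _, [] => acc
  | acc, cm, y :: ys =>
      altInner x (acc + if cmLe cm (min x y) then 1 else 0) (upd cm y) ys

-- outer loop: i runs over the list (people[i] = head, people[i+1:] = tail)
def altOuter : Int → List Int → Int
  | acc, [] => acc
  | acc, x :: t => altOuter (altInner x acc none t) t

def solution_alt (N : Int) (people : List Int) : Int := altOuter 0 people

-- ===== PRECONDITION & SPEC =====
def Spec_solution (N : Int) (people : List Int) (out : Int) : Prop := out = solution_alt N people
instance (N : Int) (people : List Int) (out : Int) : Decidable (Spec_solution N people out) := by unfold Spec_solution; infer_instance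

-- ===== CLAIM (what is proved, stated in full; the proofs are below) =====
def Claim_equal_solution : Prop := ∀ (N : Int) (people : List Int), Dom_solution N people → Spec_solution N people (solution N people)

-- ===== LEMMAS AND PROOFS =====

-- proof-side notions -------------------------------------------------------

-- the right-visible heights of the processed prefix, read from the reversed prefix
-- (keep x iff it is ≥ the running max cm of everything read so far)
def W : Option Int → List Int → List Int
  | _, [] => []
  | cm, x :: t => if cmLe cm x then x :: W (some x) t else W cm t

-- run-length encoding of adjacent equal values (stack shape: (height, count), top first)
def rle : List Int → List (Int × Int)
  | [] => []
  | x :: t =>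
      match rle t with
      | [] => [(x, 1)]
      | (h, c) :: r => if x == h then (x, c + 1) :: r else (x, 1) :: (h, c) :: r

def cntLe : List Int → Int → Int
  | [], _ => 0
  | x :: t, n => (if x ≤ n then 1 else 0) + cntLe t n

def cntLt : List Int → Int → Int
  | [], _ => 0
  | x :: t, n => (if x < n then 1 else 0) + cntLt t n

def cntEq : List Int → Int → Int
  | [], _ => 0
  | x :: t, n => (if x = n then 1 else 0) + cntEq t n

def anyGt (l : List Int) (n : Int) : Bool := l.any (fun x => decide (n < x))

-- number of earlier persons (in the reversed prefix) visible from a new person of height n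
def visR (n : Int) : Option Int → List Int → Int
  | _, [] => 0
  | cm, x :: t => (if cmLe cm (min x n) then 1 else 0) + visR n (upd cm x) t

def incS (S : List (Int × Int)) (n : Int) : Int := (stepA (0, S) n).1
def pushS (S : List (Int × Int)) (n : Int) : List (Int × Int) := (stepA (0, S) n).2

def foldUpd (cm : Option Int) (l : List Int) : Option Int := l.foldl upd cm

-- basic facts --------------------------------------------------------------

theorem upd_pos (cm : Option Int) (x : Int) (h : cmLe cm x = true) : upd cm x = some x := by
  cases cm with
  | none => rfl
  | some c =>
      simp only [cmLe, decide_eq_true_eq] at h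
      simp only [upd]
      rcases lt_or_eq_of_le h with h' | h'
      · simp [h']
      · simp [h']

theorem upd_neg (cm : Option Int) (x : Int) (h : cmLe cm x = false) : upd cm x = cm := by
  cases cm with
  | none => simp [cmLe] at h
  | some c =>
      simp only [cmLe, decide_eq_false_iff_not, not_le] at h
      simp only [upd, if_neg (by omega : ¬ c < x)]

theorem upd_comm (cm : Option Int) (a b : Int) : upd (upd cm a) b = upd (upd cm b) a := by
  cases cm <;> simp only [upd] <;> split_ifs <;> simp_all <;> omega

theorem popWhile_add (n : Int) (S : List (Int × Int)) (a b : Int) :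
    popWhile n (a + b) S = (a + (popWhile n b S).1, (popWhile n b S).2) := by
  induction S generalizing b with
  | nil => simp [popWhile]
  | cons hd tl ih =>
      obtain ⟨h, c⟩ := hd
      by_cases hh : h < n
      · simp [popWhile, hh, add_assoc, ih]
      · simp [popWhile, hh]

theorem stepA_split (st : Int × List (Int × Int)) (n : Int) :
    stepA st n = (st.1 + incS st.2 n, pushS st.2 n) := by
  obtain ⟨a, S⟩ := st
  have h := popWhile_add n S a 0
  simp only [add_zero] at h
  rcases hp : popWhile n 0 S with ⟨v, S2⟩
  rw [hp] at h
  simp only [stepA, incS, pushS, h, hp]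
  rcases S2 with _ | ⟨⟨h', c'⟩, rest⟩
  · simp
  · by_cases he : h' == n
    · simp only [he, if_true, Prod.ext_iff]
      refine ⟨?_, by simp⟩
      split_ifs <;> ring
    · simp only [he, Bool.false_eq_true, if_false, Prod.ext_iff]
      exact ⟨by ring, by simp⟩

-- W facts ------------------------------------------------------------------

theorem W_ge (l : List Int) (cm : Option Int) (z : Int) (hz : z ∈ W cm l) : cmLe cm z = true := by
  induction l generalizing cm with
  | nil => simp [W] at hz
  | cons x t ih =>
      by_cases hk : cmLe cm x = true
      · simp only [W, hk, if_true, List.mem_cons] at hz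
        rcases hz with rfl | hz
        · exact hk
        · have h2 := ih (some x) hz
          cases cm with
          | none => rfl
          | some c =>
              simp only [cmLe, decide_eq_true_eq] at h2 hk ⊢
              omega
      · simp only [W] at hz
        rw [if_neg hk] at hz
        exact ih cm hz

theorem W_sorted (l : List Int) (cm : Option Int) : (W cm l).Pairwise (· ≤ ·) := by
  induction l generalizing cm with
  | nil => simp [W]
  | cons x t ih =>
      by_cases hk : cmLe cm x = true
      · simp only [W, hk, if_true]
        refine List.pairwise_cons.mpr ⟨fun z hz => ?_, ih (some x)⟩
        have := W_ge t (some x) z hz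
        simpa [cmLe] using this
      · simp only [W]
        rw [if_neg hk]
        exact ih cm

theorem W_filter (l : List Int) (cm : Option Int) :
    W cm l = (W none l).filter (fun z => cmLe cm z) := by
  induction l generalizing cm with
  | nil => simp [W]
  | cons x t ih =>
      have hnone : W none (x :: t) = x :: W (some x) t := by simp [W, cmLe]
      by_cases hk : cmLe cm x = true
      · rw [hnone]
        simp only [W, List.filter_cons, hk, if_true]
        congr 1
        rw [List.filter_eq_self.mpr]
        intro z hz
        have hxz := W_ge t (some x) z hz
        simp only [cmLe, decide_eq_true_eq] at hxz
        cases cm with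
        | none => rfl
        | some c =>
            simp only [cmLe, decide_eq_true_eq] at hk ⊢
            omega
      · rw [hnone]
        simp only [W, List.filter_cons]
        rw [if_neg hk, if_neg (by simpa using hk)]
        rw [ih cm, ih (some x), List.filter_filter]
        apply List.filter_congr
        intro z _
        cases cm with
        | none => exact absurd rfl hk
        | some c =>
            have hxc : x < c := by
              by_contra hcon
              exact hk (by simp [cmLe]; omega)
            simp only [cmLe]
            by_cases hcz : c ≤ z
            · simp [hcz, show x ≤ z by omega]
            · simp [hcz]

theorem anyGt_W (l : List Int) (cm : Option Int) (n : Int) (hcm : cmLe cm n = true) :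
    anyGt (W cm l) n = anyGt l n := by
  induction l generalizing cm with
  | nil => simp [W]
  | cons x t ih =>
      by_cases hk : cmLe cm x = true
      · simp only [W, hk, if_true]
        by_cases hx : n < x
        · simp [anyGt, hx]
        · have : cmLe (some x) n = true := by simp [cmLe]; omega
          simp [anyGt, hx] at *
          simpa [anyGt] using ih (some x) this
      · simp only [W]
        rw [if_neg hk]
        have hx : ¬ n < x := by
          cases cm with
          | none => exact absurd rfl hk
          | some c =>
              have : ¬ c ≤ x := fun hcon => hk (by simp [cmLe, hcon])
              simp only [cmLe, decide_eq_true_eq] at hcm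
              omega
        rw [show anyGt (x :: t) n = anyGt t n by
          simp [anyGt, show decide (n < x) = false by simp [hx]]]
        exact ih cm hcm

theorem cntLe_zero (L : List Int) (n : Int) (h : ∀ z ∈ L, n < z) : cntLe L n = 0 := by
  induction L with
  | nil => rfl
  | cons x t ih =>
      have hx := h x (by simp)
      simp only [cntLe, if_neg (by omega : ¬ x ≤ n), ih (fun z hz => h z (by simp [hz]))]
      omega

theorem cntEq_zero (L : List Int) (n : Int) (h : ∀ z ∈ L, n < z) : cntEq L n = 0 := by
  induction L with
  | nil => rfl
  | cons x t ih =>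
      have hx := h x (by simp)
      simp only [cntEq, if_neg (by omega : ¬ x = n), ih (fun z hz => h z (by simp [hz]))]
      omega

theorem cntLt_zero (L : List Int) (n : Int) (h : ∀ z ∈ L, n ≤ z) : cntLt L n = 0 := by
  induction L with
  | nil => rfl
  | cons x t ih =>
      have hx := h x (by simp)
      simp only [cntLt, if_neg (by omega : ¬ x < n), ih (fun z hz => h z (by simp [hz]))]
      omega

theorem cntLe_split (L : List Int) (n : Int) : cntLe L n = cntLt L n + cntEq L n := by
  induction L with
  | nil => rfl
  | cons x t ih => simp only [cntLe, cntLt, cntEq, ih]; split_ifs <;> omega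

-- the main counting identity: visR counts the visible heights ≤ n plus one taller one
theorem visR_count (l : List Int) (cm : Option Int) (n : Int) :
    visR n cm l = if cmLe cm n then cntLe (W cm l) n + (if anyGt l n then 1 else 0) else 0 := by
  induction l generalizing cm with
  | nil => simp [visR, W, cntLe, anyGt]
  | cons x t ih =>
      by_cases hcm : cmLe cm n = true
      · by_cases hx : x ≤ n
        · have hmin : min x n = x := by omega
          by_cases hk : cmLe cm x = true
          · have hupd : upd cm x = some x := upd_pos cm x hk
            have hsx : cmLe (some x) n = true := by simp [cmLe]; omega
            simp only [visR, hmin, hk, if_true, hupd, ih, hsx, hcm, W,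
              anyGt, List.any_cons, show decide (n < x) = false by simp; omega,
              Bool.false_or, cntLe, if_pos hx]
            ring_nf
          · have hupd : upd cm x = cm := upd_neg cm x (by simpa using hk)
            simp only [Bool.not_eq_true] at hk
            simp only [visR, hmin, hk, Bool.false_eq_true, if_false, hupd, ih, hcm, if_true, W,
              anyGt, List.any_cons, show decide (n < x) = false by simp; omega,
              Bool.false_or]
            ring_nf
        · -- x > n : this pair is visible, and nothing beyond it can be
          have hmin : min x n = n := by omega
          have hk : cmLe cm x = true := by
            cases cm with
            | none => rfl
            | some c =>
                simp only [cmLe, decide_eq_true_eq] at hcm ⊢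
                omega
          have hupd : upd cm x = some x := upd_pos cm x hk
          have hsx : cmLe (some x) n = false := by simp [cmLe]; omega
          have hrec : visR n (some x) t = 0 := by rw [ih]; simp [hsx]
          have hcnt : cntLe (W (some x) t) n = 0 := by
            apply cntLe_zero
            intro z hz
            have := W_ge t (some x) z hz
            simp [cmLe] at this
            omega
          simp only [visR, hmin, hcm, if_true, hupd, hrec, W, hk, cntLe,
            if_neg (by omega : ¬ x ≤ n), hcnt, anyGt, List.any_cons,
            show decide (n < x) = true by simp; omega, Bool.true_or, if_true]
          omega
      · -- running max already exceeds n: nothing more is visible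
        simp only [Bool.not_eq_true] at hcm
        have h1 : cmLe cm (min x n) = false := by
          cases cm with
          | none => simp [cmLe] at hcm
          | some c =>
              simp only [cmLe, decide_eq_false_iff_not, not_le] at hcm ⊢
              omega
        have h2 : cmLe (upd cm x) n = false := by
          cases cm with
          | none => simp [cmLe] at hcm
          | some c =>
              simp only [cmLe, decide_eq_false_iff_not, not_le, upd] at hcm ⊢
              split_ifs <;> omega
        simp only [visR, h1, Bool.false_eq_true, if_false, ih, h2, hcm]
        omega

-- rle facts ----------------------------------------------------------------

theorem rle_cons (x : Int) (t : List Int) : ∃ k r, rle (x :: t) = (x, k) :: r := by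
  cases h : rle t with
  | nil => exact ⟨1, [], by simp [rle, h]⟩
  | cons p r =>
      obtain ⟨h', c'⟩ := p
      by_cases he : x = h'
      · subst he; exact ⟨c' + 1, r, by simp [rle, h]⟩
      · exact ⟨1, (h', c') :: r, by simp [rle, h, he]⟩

theorem rle_nil_iff (l : List Int) : rle l = [] ↔ l = [] := by
  cases l with
  | nil => simp [rle]
  | cons x t =>
      simp only [List.cons_ne_nil, iff_false]
      obtain ⟨k, r, hr⟩ := rle_cons x t
      simp [hr]

-- run-length structure of a sorted nonempty list
theorem rle_sorted_cons (x : Int) (t : List Int) (hs : (x :: t).Pairwise (· ≤ ·)) :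
    rle (x :: t) = (x, 1 + cntEq t x) :: rle (t.dropWhile (fun z => z == x)) := by
  induction t with
  | nil => simp [rle, cntEq]
  | cons y s ih =>
      have hxy : x ≤ y := (List.pairwise_cons.mp hs).1 y (by simp)
      have hys : ∀ z ∈ s, y ≤ z := (List.pairwise_cons.mp (List.pairwise_cons.mp hs).2).1
      by_cases he : y = x
      · subst he
        have hs' : (y :: s).Pairwise (· ≤ ·) := by
          refine List.pairwise_cons.mpr ⟨hys, (List.pairwise_cons.mp (List.pairwise_cons.mp hs).2).2⟩
        rw [show rle (y :: y :: s) = match rle (y :: s) with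
          | [] => [(y, 1)]
          | (h, c) :: r => if y == h then (y, c + 1) :: r else (y, 1) :: (h, c) :: r from rfl]
        rw [ih hs']
        simp only [beq_self_eq_true, if_true, List.dropWhile_cons]
        simp [cntEq]
        try omega
      · obtain ⟨k, r, hr⟩ := rle_cons y s
        have hxy' : x < y := lt_of_le_of_ne hxy (fun h => he h.symm)
        rw [show rle (x :: y :: s) = match rle (y :: s) with
          | [] => [(x, 1)]
          | (h, c) :: r => if x == h then (x, c + 1) :: r else (x, 1) :: (h, c) :: r from rfl]
        rw [hr]
        have hne : (x == y) = false := by simp; omega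
        simp only [hne, Bool.false_eq_true, if_false]
        have hcz : cntEq s x = 0 := cntEq_zero s x (fun z hz => by have := hys z hz; omega)
        simp only [cntEq, if_neg (by omega : ¬ y = x), hcz, List.dropWhile_cons,
          show (y == x) = false by simp; omega, Bool.false_eq_true, if_false, hr]
        norm_num

-- popWhile over the rle of a sorted list ------------------------------------

theorem popWhile_rle (n : Int) (L : List Int) (hs : L.Pairwise (· ≤ ·)) (a : Int) :
    popWhile n a (rle L) =
      (a + cntLt L n, rle (L.dropWhile (fun x => decide (x < n)))) := by
  induction L generalizing a with
  | nil => simp [rle, popWhile, cntLt]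
  | cons x t ih =>
      have hst : t.Pairwise (· ≤ ·) := (List.pairwise_cons.mp hs).2
      have hxt : ∀ z ∈ t, x ≤ z := (List.pairwise_cons.mp hs).1
      by_cases hx : x < n
      · -- the whole head run is popped
        have hdw : (x :: t).dropWhile (fun x => decide (x < n)) = t.dropWhile (fun x => decide (x < n)) := by
          simp [hx]
        rw [hdw]
        cases hrt : rle t with
        | nil =>
            have ht : t = [] := (rle_nil_iff t).mp hrt
            subst ht
            simp [rle, popWhile, hx, cntLt, List.dropWhile]
        | cons p r =>
            obtain ⟨h, c⟩ := p
            by_cases he : x = h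
            · subst he
              rw [show rle (x :: t) = (x, c + 1) :: r by simp [rle, hrt]]
              rw [show popWhile n a ((x, c + 1) :: r) = popWhile n (a + (c + 1)) r by
                simp [popWhile, hx]]
              have := ih hst (a + 1)
              rw [hrt] at this
              rw [show popWhile n (a + 1) ((x, c) :: r) = popWhile n (a + 1 + c) r by
                simp [popWhile, hx]] at this
              rw [show a + (c + 1) = a + 1 + c by ring, this]
              simp only [cntLt, if_pos hx, Prod.mk.injEq]
              exact ⟨by ring, by trivial⟩
            · rw [show rle (x :: t) = (x, 1) :: (h, c) :: r by simp [rle, hrt]; omega]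
              rw [show popWhile n a ((x, 1) :: (h, c) :: r) = popWhile n (a + 1) ((h, c) :: r) by
                simp [popWhile, hx]]
              have := ih hst (a + 1)
              rw [hrt] at this
              rw [this]
              simp only [cntLt, if_pos hx, Prod.mk.injEq]
              exact ⟨by ring, by trivial⟩
      · -- x ≥ n: nothing is popped
        have hdw : (x :: t).dropWhile (fun x => decide (x < n)) = x :: t := by
          simp [hx]
        have hct : cntLt t n = 0 := cntLt_zero t n (fun z hz => by have := hxt z hz; omega)
        obtain ⟨k, r, hr⟩ := rle_cons x t
        rw [hdw, hr, show popWhile n a ((x, k) :: r) = (a, (x, k) :: r) by simp [popWhile, hx], ← hr]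
        simp [cntLt, hx, hct]

-- helper facts about dropWhile (< n) on a sorted list
theorem dropWhile_ge (L : List Int) (n : Int) (hs : L.Pairwise (· ≤ ·)) :
    ∀ z ∈ L.dropWhile (fun x => decide (x < n)), n ≤ z := by
  induction L with
  | nil => simp
  | cons x t ih =>
      intro z hz
      by_cases hx : x < n
      · exact ih (List.pairwise_cons.mp hs).2 z (by simpa [List.dropWhile_cons, hx] using hz)
      · simp only [List.dropWhile_cons, show decide (x < n) = false by simp [hx],
          Bool.false_eq_true, if_false, List.mem_cons] at hz
        rcases hz with rfl | hz
        · omega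
        · have := (List.pairwise_cons.mp hs).1 z hz; omega

theorem cntEq_dropWhile (L : List Int) (n : Int) :
    cntEq L n = cntEq (L.dropWhile (fun x => decide (x < n))) n := by
  induction L with
  | nil => rfl
  | cons x t ih =>
      by_cases hx : x < n
      · simp only [List.dropWhile_cons, show decide (x < n) = true by simp [hx], if_true,
          cntEq, if_neg (by omega : ¬ x = n), ← ih]
        omega
      · simp [show decide (x < n) = false by simp [hx]]

theorem anyGt_dropWhile (L : List Int) (n : Int) :
    anyGt L n = anyGt (L.dropWhile (fun x => decide (x < n))) n := by
  induction L with
  | nil => rfl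
  | cons x t ih =>
      by_cases hx : x < n
      · simp only [List.dropWhile_cons, show decide (x < n) = true by simp [hx], if_true,
          anyGt, List.any_cons, show decide (n < x) = false by simp; omega, Bool.false_or] at *
        exact ih
      · simp [show decide (x < n) = false by simp [hx]]

-- the answer increment of one step of A over a sorted visible list
theorem incS_rle (L : List Int) (n : Int) (hs : L.Pairwise (· ≤ ·)) :
    incS (rle L) n = cntLe L n + (if anyGt L n then 1 else 0) := by
  have hs' : (L.dropWhile (fun x => decide (x < n))).Pairwise (· ≤ ·) :=
    hs.sublist (List.dropWhile_sublist _)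
  have hge := dropWhile_ge L n hs
  have hpop := popWhile_rle n L hs 0
  rw [zero_add] at hpop
  rw [cntLe_split L n, cntEq_dropWhile L n, anyGt_dropWhile L n]
  cases hL : L.dropWhile (fun x => decide (x < n)) with
  | nil =>
      rw [hL] at hpop
      simp only [incS, stepA, hpop, rle, cntEq, anyGt, List.any_nil, Bool.false_eq_true, if_false]
      omega
  | cons x t' =>
      rw [hL] at hpop hs' hge
      have hnx : n ≤ x := hge x (by simp)
      rw [rle_sorted_cons x t' hs'] at hpop
      by_cases hxn : x = n
      · subst hxn
        simp only [incS, stepA, hpop, beq_self_eq_true, if_true]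
        have htge : ∀ z ∈ t', x ≤ z := (List.pairwise_cons.mp hs').1
        by_cases hall : ∀ z ∈ t', z = x
        · have hdw : t'.dropWhile (fun z => z == x) = [] :=
            List.dropWhile_eq_nil_iff.mpr (fun z hz => by simp [hall z hz])
          have hany : anyGt (x :: t') x = false := by
            simp only [anyGt, List.any_eq_false]
            intro z hz
            simp only [List.mem_cons] at hz
            rcases hz with rfl | hz
            · simp
            · simp [hall z hz]
          rw [hdw, hany]
          simp only [rle, List.isEmpty_nil, if_true, Bool.false_eq_true, if_false, cntEq]
          try omega
        · simp only [not_forall] at hall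
          obtain ⟨z0, hz0, hz0ne⟩ := hall
          have hdw : t'.dropWhile (fun z => z == x) ≠ [] := by
            intro hc
            exact hz0ne (by simpa using List.dropWhile_eq_nil_iff.mp hc z0 hz0)
          have hany : anyGt (x :: t') x = true := by
            simp only [anyGt, List.any_eq_true]
            refine ⟨z0, List.mem_cons_of_mem _ hz0, ?_⟩
            have := htge z0 hz0
            simp only [decide_eq_true_eq]
            omega
          rw [show (rle (t'.dropWhile (fun z => z == x))).isEmpty = false by
            simp [rle_nil_iff, hdw]]
          rw [hany]
          simp only [Bool.false_eq_true, if_false, if_true, cntEq]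
          try omega
      · have hxn' : n < x := by omega
        simp only [incS, stepA, hpop, show (x == n) = false by simp; omega,
          Bool.false_eq_true, if_false]
        have hce : cntEq (x :: t') n = 0 :=
          cntEq_zero _ n (fun z hz => by
            simp only [List.mem_cons] at hz
            rcases hz with rfl | hz
            · omega
            · have := (List.pairwise_cons.mp hs').1 z hz; omega)
        have hany : anyGt (x :: t') n = true := by
          simp only [anyGt, List.any_eq_true]
          exact ⟨x, by simp, by simp only [decide_eq_true_eq]; omega⟩
        rw [hce, hany]
        simp

-- push over the rle of a sorted list ----------------------------------------

theorem filter_eq_dropWhile (L : List Int) (m : Int) (hs : L.Pairwise (· ≤ ·)) :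
    L.filter (fun z => cmLe (some m) z) = L.dropWhile (fun z => decide (z < m)) := by
  induction L with
  | nil => rfl
  | cons x t ih =>
      by_cases hx : x < m
      · simp only [List.filter_cons, List.dropWhile_cons,
          show cmLe (some m) x = false by simp [cmLe]; omega,
          show decide (x < m) = true by simp [hx], if_true, Bool.false_eq_true, if_false]
        exact ih (List.pairwise_cons.mp hs).2
      · simp only [List.filter_cons, List.dropWhile_cons,
          show cmLe (some m) x = true by simp [cmLe]; omega,
          show decide (x < m) = false by simp [hx], if_true, Bool.false_eq_true, if_false]
        congr 1
        apply List.filter_eq_self.mpr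
        intro z hz
        have := (List.pairwise_cons.mp hs).1 z hz
        simp [cmLe]; omega

theorem pushS_rle (L : List Int) (m : Int) (hs : L.Pairwise (· ≤ ·)) :
    pushS (rle L) m = rle (m :: L.filter (fun z => cmLe (some m) z)) := by
  rw [filter_eq_dropWhile L m hs]
  have hs' : (L.dropWhile (fun z => decide (z < m))).Pairwise (· ≤ ·) :=
    hs.sublist (List.dropWhile_sublist _)
  have hge := dropWhile_ge L m hs
  have hpop := popWhile_rle m L hs 0
  rw [zero_add] at hpop
  cases hL : L.dropWhile (fun z => decide (z < m)) with
  | nil =>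
      rw [hL] at hpop
      simp only [pushS, stepA, hpop, rle]
  | cons x t' =>
      rw [hL] at hpop hs' hge
      have hmx : m ≤ x := hge x (by simp)
      obtain ⟨k, r, hr⟩ := rle_cons x t'
      rw [hr] at hpop
      by_cases hxm : x = m
      · subst hxm
        simp only [pushS, stepA, hpop, beq_self_eq_true, if_true]
        rw [show rle (x :: x :: t') = match rle (x :: t') with
          | [] => [(x, 1)]
          | (h, c) :: r => if x == h then (x, c + 1) :: r else (x, 1) :: (h, c) :: r from rfl]
        rw [hr]
        simp only [beq_self_eq_true, if_true]
        rw [show (1 : Int) + k = k + 1 by ring]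
      · simp only [pushS, stepA, hpop, show (x == m) = false by simp; omega,
          Bool.false_eq_true, if_false]
        rw [show rle (m :: x :: t') = match rle (x :: t') with
          | [] => [(m, 1)]
          | (h, c) :: r => if m == h then (m, c + 1) :: r else (m, 1) :: (h, c) :: r from rfl]
        rw [hr]
        simp [show (m == x) = false by simp; omega]

-- the stack of A after a prefix is the rle of the right-visible heights -----

theorem stack_char (p : List Int) :
    (List.foldl stepA (0, ([] : List (Int × Int))) p).2 = rle (W none p.reverse) := by
  induction p using List.reverseRecOn with
  | nil => simp [W, rle]
  | append_singleton p m ih =>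
      rw [List.foldl_append, List.foldl_cons, List.foldl_nil, stepA_split]
      simp only [ih]
      rw [pushS_rle _ m (W_sorted p.reverse none)]
      rw [← W_filter p.reverse (some m)]
      have : (p ++ [m]).reverse = m :: p.reverse := by simp
      rw [this]
      simp [W, cmLe]

-- A-side snoc recurrence ----------------------------------------------------

theorem ansA_snoc (p : List Int) (m : Int) :
    (List.foldl stepA (0, ([] : List (Int × Int))) (p ++ [m])).1 =
      (List.foldl stepA (0, ([] : List (Int × Int))) p).1 + visR m none p.reverse := by
  rw [List.foldl_append, List.foldl_cons, List.foldl_nil, stepA_split, stack_char]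
  rw [incS_rle _ m (W_sorted p.reverse none)]
  rw [visR_count p.reverse none m]
  simp only [cmLe, if_true]
  rw [anyGt_W p.reverse none m (by simp [cmLe])]

-- B-side lemmas --------------------------------------------------------------

theorem altInner_add (l : List Int) (x a : Int) (cm : Option Int) :
    altInner x a cm l = a + altInner x 0 cm l := by
  induction l generalizing a cm with
  | nil => simp [altInner]
  | cons y ys ih =>
      simp only [altInner]
      rw [ih, ih (a := 0 + _)]
      omega

theorem altOuter_add (l : List Int) (a : Int) : altOuter a l = a + altOuter 0 l := by
  induction l generalizing a with
  | nil => simp [altOuter]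
  | cons x t ih =>
      simp only [altOuter]
      rw [ih, ih (a := altInner x 0 none t), altInner_add]
      omega

theorem altInner_snoc (l : List Int) (x a m : Int) (cm : Option Int) :
    altInner x a cm (l ++ [m]) =
      altInner x a cm l + (if cmLe (foldUpd cm l) (min x m) then 1 else 0) := by
  induction l generalizing a cm with
  | nil => simp [altInner, foldUpd]
  | cons y ys ih =>
      simp only [List.cons_append, altInner]
      rw [ih]
      simp [foldUpd]

theorem visR_snoc (l : List Int) (n x : Int) (cm : Option Int) :
    visR n cm (l ++ [x]) =
      visR n cm l + (if cmLe (foldUpd cm l) (min x n) then 1 else 0) := by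
  induction l generalizing cm with
  | nil => simp [visR, foldUpd]
  | cons y ys ih =>
      simp only [List.cons_append, visR]
      rw [ih]
      simp [foldUpd]
      ring_nf

theorem foldUpd_upd_comm (t : List Int) (cm : Option Int) (x : Int) :
    foldUpd (upd cm x) t = upd (foldUpd cm t) x := by
  induction t generalizing cm with
  | nil => rfl
  | cons y s ih =>
      simp only [foldUpd, List.foldl_cons] at *
      rw [upd_comm, ih]

theorem foldUpd_reverse (l : List Int) (cm : Option Int) :
    foldUpd cm l.reverse = foldUpd cm l := by
  induction l generalizing cm with
  | nil => rfl
  | cons x t ih =>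
      rw [List.reverse_cons]
      rw [show foldUpd cm (t.reverse ++ [x]) = upd (foldUpd cm t.reverse) x by
        simp [foldUpd, List.foldl_append]]
      rw [ih]
      rw [show foldUpd cm (x :: t) = foldUpd (upd cm x) t from rfl]
      rw [foldUpd_upd_comm]

theorem altOuter_snoc (p : List Int) (m : Int) :
    altOuter 0 (p ++ [m]) = altOuter 0 p + visR m none p.reverse := by
  induction p with
  | nil => simp [altOuter, altInner, visR]
  | cons x t ih =>
      simp only [List.cons_append, altOuter]
      rw [altOuter_add, altInner_snoc, ih, altOuter_add (a := altInner x 0 none t), altInner_add]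
      rw [List.reverse_cons, visR_snoc, foldUpd_reverse]
      omega

-- main equivalence -----------------------------------------------------------

theorem main_eq (p : List Int) :
    (List.foldl stepA (0, ([] : List (Int × Int))) p).1 = altOuter 0 p := by
  induction p using List.reverseRecOn with
  | nil => rfl
  | append_singleton p m ih => rw [ansA_snoc, altOuter_snoc, ih]

-- ===== VERDICT (by name: the statement is the Claim_ definition above) =====
theorem solution_spec : Claim_equal_solution := by
  intro N people _
  unfold Spec_solution solution solution_alt
  exact main_eq people
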